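-- pv_equiv track=rewrite | github.com/dddd2024/reverse-agent | reverse_agent/sample_solver.py | _dedupe_top_scored_by_prefix
-- ===== SOURCE A (Python) =====
-- SAMPLEREVERSE_TARGET_PREFIX = "flag{".encode("utf-16le")
--
-- def _to_lower_ascii(value: int) -> int:
--     if 0x41 <= value <= 0x5A:
--         return value + 0x20
--     return value
--
-- def _prefix_distance(prefix_hex: str) -> int:
--     raw = bytes.fromhex(prefix_hex)
--     compare_len = min(len(raw), len(SAMPLEREVERSE_TARGET_PREFIX))
--     distance = sum(
--         abs(raw[i] - SAMPLEREVERSE_TARGET_PREFIX[i]) for i in range(compare_len)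
--     )
--     if len(raw) < len(SAMPLEREVERSE_TARGET_PREFIX):
--         distance += 0x100 * (len(SAMPLEREVERSE_TARGET_PREFIX) - len(raw))
--     elif len(raw) > len(SAMPLEREVERSE_TARGET_PREFIX):
--         distance += sum(raw[len(SAMPLEREVERSE_TARGET_PREFIX) :])
--     return distance
--
-- def _wide_prefix_metrics(prefix_hex: str) -> tuple[int, int]:
--     try:
--         raw = bytes.fromhex(prefix_hex)
--     except Exception:
--         return (0, 0)
--     char_count = min(len(raw) // 2, len(SAMPLEREVERSE_TARGET_PREFIX) // 2)
--     contiguous = 0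
--     matched = 0
--     for idx in range(char_count):
--         raw_code = raw[idx * 2] | (raw[idx * 2 + 1] << 8)
--         target_code = (
--             SAMPLEREVERSE_TARGET_PREFIX[idx * 2]
--             | (SAMPLEREVERSE_TARGET_PREFIX[idx * 2 + 1] << 8)
--         )
--         if _to_lower_ascii(raw_code) == _to_lower_ascii(target_code):
--             matched += 1
--             if idx == contiguous:
--                 contiguous += 1
--     return contiguous, matched
--
-- def _objective_tuple(prefix_hex: str, score: int, mask: int) -> tuple[int, int, int, int, int]:
--     wide_prefix, wide_matched = _wide_prefix_metrics(prefix_hex)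
--     return (wide_prefix, wide_matched, score, mask, -_prefix_distance(prefix_hex))
--
-- def _dedupe_top_scored_by_prefix(
--     items: list[tuple[int, int, str, str]], limit: int = 2048
-- ) -> list[tuple[int, int, str, str]]:
--     best_by_prefix: dict[str, tuple[int, int, str, str]] = {}
--     for score, mask, candidate, prefix_hex in items:
--         cur = best_by_prefix.get(prefix_hex)
--         nxt = (score, mask, candidate, prefix_hex)
--         if cur is None or _objective_tuple(prefix_hex, score, mask) > _objective_tuple(
--             cur[3], cur[0], cur[1]
--         ) or (
--             _objective_tuple(prefix_hex, score, mask)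
--             == _objective_tuple(cur[3], cur[0], cur[1])
--             and candidate.encode("latin1", errors="ignore").hex()
--             < cur[2].encode("latin1", errors="ignore").hex()
--         ):
--             best_by_prefix[prefix_hex] = nxt
--     out = list(best_by_prefix.values())
--     out.sort(
--         key=lambda item: (
--             _objective_tuple(item[3], item[0], item[1]),
--             -len(item[2]),
--             item[2],
--         ),
--         reverse=True,
--     )
--     return out[:limit]
-- ===== SOURCE B (Python) =====
-- SAMPLEREVERSE_TARGET_PREFIX = "flag{".encode("utf-16le")
--
-- def _to_lower_ascii(value: int) -> int:
--     if 0x41 <= value <= 0x5A: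
--         return value + 0x20
--     return value
--
-- def _objective(prefix_hex: str, score: int, mask: int):
--     # same value as A's _objective_tuple, computed zip-wise from the decoded bytes
--     raw = bytes.fromhex(prefix_hex)
--     target = SAMPLEREVERSE_TARGET_PREFIX
--     dist = sum(abs(a - b) for a, b in zip(raw, target))
--     if len(raw) < len(target):
--         dist += 0x100 * (len(target) - len(raw))
--     else:
--         dist += sum(raw[len(target):])
--     raw_codes = [lo + 256 * hi for lo, hi in zip(raw[0::2], raw[1::2])]
--     target_codes = [lo + 256 * hi for lo, hi in zip(target[0::2], target[1::2])]
--     flags = [_to_lower_ascii(a) == _to_lower_ascii(b)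
--              for a, b in zip(raw_codes, target_codes)]
--     contiguous = 0
--     for f in flags:
--         if not f:
--             break
--         contiguous += 1
--     return (contiguous, sum(flags), score, mask, -dist)
--
-- def _dedupe_top_scored_by_prefix(items, limit: int = 2048):
--     # decorate every item once with its per-prefix selection key
--     dec = [((tuple(-c for c in _objective(p, s, m)), cand), (s, m, cand, p))
--            for s, m, cand, p in items]
--     reps = []
--     seen = set()
--     for _, (s, m, cand, p) in dec:
--         if p in seen:
--             continue
--         seen.add(p)
--         # representative of this prefix: max objective, ties to smallest candidate,
--         # further ties to the earliest occurrence (min keeps the first minimum)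
--         reps.append(min((e for e in dec if e[1][3] == p), key=lambda e: e[0])[1])
--     reps.sort(key=lambda it: (_objective(it[3], it[0], it[1]), -len(it[2]), it[2]),
--               reverse=True)
--     return reps[:limit]
-- ===== Notes on version B (the rewrite author's own statement) =====
-- stated objective: alternative
-- what changed: A keeps a running best-per-prefix dict (recomputing _objective_tuple for contender and incumbent on every item) and compares candidates by their latin1-hex encoding; B decorates every item once with a precomputed (negated objective, candidate) selection key, walks the list with a seen-set and picks each first-occurring prefix's representative by a min() scan over the decorated list, comparing candidates directly as strings (equivalent to the hex order on the ASCII domain), and computes the objective zip-wise instead of by index loops.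
import Mathlib
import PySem

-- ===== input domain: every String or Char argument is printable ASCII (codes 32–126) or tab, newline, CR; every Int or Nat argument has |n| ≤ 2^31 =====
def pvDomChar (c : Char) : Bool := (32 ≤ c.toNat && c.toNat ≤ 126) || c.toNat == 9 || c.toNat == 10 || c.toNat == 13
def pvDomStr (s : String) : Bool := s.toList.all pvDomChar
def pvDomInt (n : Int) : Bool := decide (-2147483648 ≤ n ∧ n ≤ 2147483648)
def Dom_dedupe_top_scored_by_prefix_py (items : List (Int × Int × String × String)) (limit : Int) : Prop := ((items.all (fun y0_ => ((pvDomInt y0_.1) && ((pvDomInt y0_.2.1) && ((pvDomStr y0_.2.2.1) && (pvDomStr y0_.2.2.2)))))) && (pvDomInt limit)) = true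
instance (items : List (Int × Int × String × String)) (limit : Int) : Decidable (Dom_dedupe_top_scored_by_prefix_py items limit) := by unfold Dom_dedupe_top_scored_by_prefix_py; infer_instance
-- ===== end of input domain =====

-- B replaces A's running-best-per-prefix dict fold by: decorate each item once with its
-- selection key, walk the list with a seen-set picking, for each first-occurring prefix,
-- the group minimum by a scan, and compare candidates directly as strings (equal to A's
-- latin1-hex comparison on the ASCII domain). Return value only; no argument is mutated.

-- ===== shared helpers (module constant and builtins both Pythons use verbatim) =====

-- "flag{".encode("utf-16le") as a byte list
def pvTargetPrefix : List Int := [0x66, 0, 0x6c, 0, 0x61, 0, 0x67, 0, 0x7b, 0]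

-- ASCII whitespace, which bytes.fromhex skips between byte pairs
def pvIsWS (c : Char) : Bool := c == ' ' || c == '\t' || c == '\n' || c == '\r' || c.toNat == 11 || c.toNat == 12

def pvIsHexDig (c : Char) : Bool :=
  ('0' ≤ c && c ≤ '9') || ('a' ≤ c && c ≤ 'f') || ('A' ≤ c && c ≤ 'F')

def pvHexVal (c : Char) : Int :=
  if '0' ≤ c && c ≤ '9' then (c.toNat : Int) - 48
  else if 'a' ≤ c && c ≤ 'f' then (c.toNat : Int) - 87
  else (c.toNat : Int) - 55

-- bytes.fromhex: pairs of hex digits, ASCII whitespace allowed between pairs; none = ValueError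
def pvFromhex? : List Char → Option (List Int)
  | [] => some []
  | [c] => if pvIsWS c then some [] else none
  | c :: d :: rest =>
    if pvIsWS c then pvFromhex? (d :: rest)
    else if pvIsHexDig c && pvIsHexDig d then
      (pvFromhex? rest).map (fun bs => (16 * pvHexVal c + pvHexVal d) :: bs)
    else none

def pvToLowerAscii (v : Int) : Int := if 0x41 ≤ v ∧ v ≤ 0x5A then v + 0x20 else v

-- list.sort(key=…, reverse=True) / sorted(…, reverse=True): stable descending insertion
-- sort, parametric in the Bool comparison (a later item goes below every already-placed
-- item whose key is not smaller); both Pythons call this builtin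
def pvInsDesc {α : Type} (lt : α → α → Bool) (x : α) : List α → List α
  | [] => [x]
  | y :: ys => if lt y x then x :: y :: ys else y :: pvInsDesc lt x ys

def pvSortDesc {α : Type} (lt : α → α → Bool) (xs : List α) : List α :=
  xs.foldl (fun acc x => pvInsDesc lt x acc) []

-- ===== PORT A =====

-- _prefix_distance; its unguarded bytes.fromhex raises ValueError on invalid hex
-- (those inputs are outside Pre_ below; the .getD [] branch is unreachable under Pre_)
def pvPrefixDistance (prefix_hex : String) : Int :=
  let raw := (pvFromhex? prefix_hex.toList).getD []
  let compare_len := min raw.length pvTargetPrefix.length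
  let distance := (List.range compare_len).foldl
    (fun acc i => acc + |raw.getD i 0 - pvTargetPrefix.getD i 0|) 0
  if raw.length < pvTargetPrefix.length then
    distance + 0x100 * ((pvTargetPrefix.length : Int) - (raw.length : Int))
  else if raw.length > pvTargetPrefix.length then
    distance + (raw.drop pvTargetPrefix.length).foldl (· + ·) 0
  else distance

-- _wide_prefix_metrics; the try/except returns (0, 0) on invalid hex.
-- raw[2i] | (raw[2i+1] << 8) = raw[2i] + 256 * raw[2i+1]: exact, bytes are in [0, 256)
def pvWidePrefixMetrics (prefix_hex : String) : Int × Int :=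
  match pvFromhex? prefix_hex.toList with
  | none => (0, 0)
  | some raw =>
    let char_count := min (raw.length / 2) (pvTargetPrefix.length / 2)
    (List.range char_count).foldl
      (fun (cm : Int × Int) idx =>
        let raw_code := raw.getD (idx * 2) 0 + 256 * raw.getD (idx * 2 + 1) 0
        let target_code := pvTargetPrefix.getD (idx * 2) 0 + 256 * pvTargetPrefix.getD (idx * 2 + 1) 0
        if pvToLowerAscii raw_code = pvToLowerAscii target_code then
          if (idx : Int) = cm.1 then (cm.1 + 1, cm.2 + 1) else (cm.1, cm.2 + 1)
        else cm)
      (0, 0)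

def pvObjective (prefix_hex : String) (score mask : Int) : Int × Int × Int × Int × Int :=
  let wm := pvWidePrefixMetrics prefix_hex
  (wm.1, wm.2, score, mask, -(pvPrefixDistance prefix_hex))

def pvHexDigitChar (n : Nat) : Char := if n < 10 then Char.ofNat (48 + n) else Char.ofNat (87 + n)

-- candidate.encode("latin1", errors="ignore").hex(): chars ≥ 256 dropped, two lowercase hex digits per byte
def pvLatin1Hex (s : String) : String :=
  String.ofList (((s.toList.filter (fun c => c.toNat < 256)).map
    (fun c => [pvHexDigitChar (c.toNat / 16), pvHexDigitChar (c.toNat % 16)])).flatten)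

-- Python '<' on the 5-tuples returned by _objective_tuple (lexicographic)
def pvObjLt (x y : Int × Int × Int × Int × Int) : Bool :=
  decide (x.1 < y.1) || (decide (x.1 = y.1) &&
    (decide (x.2.1 < y.2.1) || (decide (x.2.1 = y.2.1) &&
      (decide (x.2.2.1 < y.2.2.1) || (decide (x.2.2.1 = y.2.2.1) &&
        (decide (x.2.2.2.1 < y.2.2.2.1) || (decide (x.2.2.2.1 = y.2.2.2.1) &&
          decide (x.2.2.2.2 < y.2.2.2.2))))))))

-- Python '<' on A's sort key (objective_tuple, -len(candidate), candidate)
def pvKeyLtA (a b : (Int × Int × Int × Int × Int) × Int × String) : Bool :=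
  pvObjLt a.1 b.1 || (decide (a.1 = b.1) &&
    (decide (a.2.1 < b.2.1) || (decide (a.2.1 = b.2.1) && decide (a.2.2 < b.2.2))))

def pvSortKey (it : Int × Int × String × String) : (Int × Int × Int × Int × Int) × Int × String :=
  (pvObjective it.2.2.2 it.1 it.2.1, -(PySem.Str.len it.2.2.1), it.2.2.1)

-- loop body of A's 'for score, mask, candidate, prefix_hex in items'
def pvStepA (d : PySem.Dict String (Int × Int × String × String))
    (it : Int × Int × String × String) : PySem.Dict String (Int × Int × String × String) :=
  match d.get? it.2.2.2 with
  | none => d.insert it.2.2.2 it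
  | some cur =>
    if pvObjLt (pvObjective cur.2.2.2 cur.1 cur.2.1) (pvObjective it.2.2.2 it.1 it.2.1)
       || (decide (pvObjective it.2.2.2 it.1 it.2.1 = pvObjective cur.2.2.2 cur.1 cur.2.1)
           && decide (pvLatin1Hex it.2.2.1 < pvLatin1Hex cur.2.2.1))
    then d.insert it.2.2.2 it else d

def dedupe_top_scored_by_prefix_py (items : List (Int × Int × String × String)) (limit : Int) :
    List (Int × Int × String × String) :=
  let best := items.foldl pvStepA PySem.Dict.empty
  let out := best.values
  PySem.List.slice (pvSortDesc (fun a b => pvKeyLtA (pvSortKey a) (pvSortKey b)) out) none (some limit)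

-- ===== PORT B =====

-- B's _objective: the same 5-tuple, computed zip-wise from the decoded bytes
-- (raw[0::2] / raw[1::2] are the even/odd byte slices; sum(flags) counts the Trues;
-- the break-loop computing `contiguous` is the length of the initial True run)
def pvObjB (prefix_hex : String) (score mask : Int) : Int × Int × Int × Int × Int :=
  let raw := (pvFromhex? prefix_hex.toList).getD []
  let dist0 := ((raw.zip pvTargetPrefix).map (fun p => |p.1 - p.2|)).sum
  let dist := if raw.length < pvTargetPrefix.length then
      dist0 + 0x100 * ((pvTargetPrefix.length : Int) - (raw.length : Int))
    else dist0 + (raw.drop pvTargetPrefix.length).sum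
  let rawCodes := (((PySem.List.slice? raw (some 0) none 2).getD []).zip
      ((PySem.List.slice? raw (some 1) none 2).getD [])).map (fun p => p.1 + 256 * p.2)
  let tgtCodes := (((PySem.List.slice? pvTargetPrefix (some 0) none 2).getD []).zip
      ((PySem.List.slice? pvTargetPrefix (some 1) none 2).getD [])).map (fun p => p.1 + 256 * p.2)
  let flags := (rawCodes.zip tgtCodes).map (fun p => pvToLowerAscii p.1 == pvToLowerAscii p.2)
  (((flags.takeWhile id).length : Int), (flags.count true : Int), score, mask, -dist)

-- Python '<' on same-length int tuples, as the list lexicographic order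
def pvListLt : List Int → List Int → Bool
  | _, [] => false
  | [], _ :: _ => true
  | a :: as_, b :: bs => decide (a < b) || (a == b && pvListLt as_ bs)

-- Python '<' on B's (int tuple, str) keys; Python str '<' is Lean String '<' (PySem)
def pvSelLt (a b : List Int × String) : Bool :=
  pvListLt a.1 b.1 || (a.1 == b.1 && decide (a.2 < b.2))

def pvObjList (o : Int × Int × Int × Int × Int) : List Int :=
  [o.1, o.2.1, o.2.2.1, o.2.2.2.1, o.2.2.2.2]

-- B's decoration pass: each item with its (negated objective tuple, candidate) key
def pvDecor (items : List (Int × Int × String × String)) :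
    List ((List Int × String) × (Int × Int × String × String)) :=
  items.map (fun it => (((pvObjList (pvObjB it.2.2.2 it.1 it.2.1)).map Neg.neg, it.2.2.1), it))

-- min(…, key=lambda e: e[0]): first element with minimal key ([] unreachable in B)
def pvMinSel (l : List ((List Int × String) × (Int × Int × String × String))) :
    (List Int × String) × (Int × Int × String × String) :=
  match l with
  | [] => (([], ""), (0, 0, "", ""))
  | h :: t => t.foldl (fun best e => if pvSelLt e.1 best.1 then e else best) h

-- B's main loop body: skip seen prefixes, else record the prefix and its group minimum
def pvStepOuter (dec : List ((List Int × String) × (Int × Int × String × String)))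
    (st : PySem.Set String × List (Int × Int × String × String))
    (e : (List Int × String) × (Int × Int × String × String)) :
    PySem.Set String × List (Int × Int × String × String) :=
  if PySem.Set.contains st.1 e.2.2.2.2 then st
  else (PySem.Set.add st.1 e.2.2.2.2,
        st.2 ++ [(pvMinSel (dec.filter (fun d => d.2.2.2.2 == e.2.2.2.2))).2])

-- B's final sort key (objective, -len(candidate), candidate) flattened to (int list, str)
def pvKeyB (it : Int × Int × String × String) : List Int × String :=
  (pvObjList (pvObjB it.2.2.2 it.1 it.2.1) ++ [-(PySem.Str.len it.2.2.1)], it.2.2.1)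

def dedupe_top_scored_by_prefix_py_alt (items : List (Int × Int × String × String)) (limit : Int) :
    List (Int × Int × String × String) :=
  let dec := pvDecor items
  let reps := (dec.foldl (pvStepOuter dec) (PySem.Set.empty, [])).2
  PySem.List.slice (pvSortDesc (fun a b => pvSelLt (pvKeyB a) (pvKeyB b)) reps) none (some limit)

-- ===== PRECONDITION & SPEC =====

-- Pre_ excludes exactly the inputs where some prefix_hex is not valid bytes.fromhex input
-- (its whitespace-separated runs must be even-length strings of hex digits): there A raises
-- ValueError (from _prefix_distance's unguarded bytes.fromhex), and so does B.
def Pre_dedupe_top_scored_by_prefix_py (items : List (Int × Int × String × String)) (limit : Int) : Prop :=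
  ∀ it ∈ items, ∀ run ∈ it.2.2.2.toList.splitOnP (fun c => pvIsWS c),
    run.all pvIsHexDig = true ∧ run.length % 2 = 0

instance (items : List (Int × Int × String × String)) (limit : Int) :
    Decidable (Pre_dedupe_top_scored_by_prefix_py items limit) := by
  unfold Pre_dedupe_top_scored_by_prefix_py; infer_instance

def pvWitness_dedupe_top_scored_by_prefix_py : (List (Int × Int × String × String)) × Int :=
  ([(3, 1, "ab", "6600"), (2, 0, "cd", "6600"), (1, 0, "e", "61 62")], 2)

def Spec_dedupe_top_scored_by_prefix_py (items : List (Int × Int × String × String)) (limit : Int)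
    (out : List (Int × Int × String × String)) : Prop :=
  out = dedupe_top_scored_by_prefix_py_alt items limit

instance (items : List (Int × Int × String × String)) (limit : Int)
    (out : List (Int × Int × String × String)) :
    Decidable (Spec_dedupe_top_scored_by_prefix_py items limit out) := by
  unfold Spec_dedupe_top_scored_by_prefix_py; infer_instance

-- ===== CLAIM (what is proved, stated in full; the proofs are below) =====
def Claim_equal_dedupe_top_scored_by_prefix_py : Prop :=
  ∀ (items : List (Int × Int × String × String)) (limit : Int),
    Dom_dedupe_top_scored_by_prefix_py items limit →
    Pre_dedupe_top_scored_by_prefix_py items limit →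
    Spec_dedupe_top_scored_by_prefix_py items limit (dedupe_top_scored_by_prefix_py items limit)

-- ===== LEMMAS AND PROOFS =====

theorem pv_hdc_lt : ∀ a < 16, ∀ b < 16, (pvHexDigitChar a < pvHexDigitChar b ↔ a < b) := by decide
theorem pv_hdc_inj : ∀ a < 16, ∀ b < 16, (pvHexDigitChar a = pvHexDigitChar b ↔ a = b) := by decide

theorem pv_char_lt (c d : Char) : c < d ↔ c.toNat < d.toNat := gt_iff_lt
theorem pv_char_eq (c d : Char) : c = d ↔ c.toNat = d.toNat := eq_iff_eq_of_cmp_eq_cmp rfl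

theorem pv_flat_lt (cs ds : List Char) (hcs : ∀ c ∈ cs, c.toNat < 256) (hds : ∀ c ∈ ds, c.toNat < 256) :
    List.Lex (·<·) ((cs.map (fun c => [pvHexDigitChar (c.toNat / 16), pvHexDigitChar (c.toNat % 16)])).flatten)
      ((ds.map (fun c => [pvHexDigitChar (c.toNat / 16), pvHexDigitChar (c.toNat % 16)])).flatten)
    ↔ List.Lex (·<·) cs ds := by
  induction cs generalizing ds with
  | nil =>
    cases ds with
    | nil => simp
    | cons d ds' => simp
  | cons c cs' ih =>
    cases ds with
    | nil => simp [List.not_lex_nil]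
    | cons d ds' =>
      have hc : c.toNat < 256 := hcs c List.mem_cons_self
      have hd : d.toNat < 256 := hds d List.mem_cons_self
      have h1 : c.toNat / 16 < 16 := by omega
      have h2 : d.toNat / 16 < 16 := by omega
      have h3 : c.toNat % 16 < 16 := by omega
      have h4 : d.toNat % 16 < 16 := by omega
      simp only [List.map_cons, List.flatten_cons, List.cons_append, List.nil_append,
        List.cons_lex_cons_iff]
      rw [ih ds' (fun x hx => hcs x (List.mem_cons_of_mem _ hx)) (fun x hx => hds x (List.mem_cons_of_mem _ hx))]
      rw [pv_hdc_lt _ h1 _ h2, pv_hdc_inj _ h1 _ h2, pv_hdc_lt _ h3 _ h4, pv_hdc_inj _ h3 _ h4,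
        pv_char_lt c d, pv_char_eq c d]
      by_cases hL : List.Lex (fun x1 x2 => x1 < x2) cs' ds'
      · simp only [hL, and_true]; omega
      · simp only [hL, and_false, or_false]; omega

theorem pv_dom_small (s : String) (hs : pvDomStr s = true) : ∀ c ∈ s.toList, c.toNat < 256 := by
  intro c hc
  have := List.all_eq_true.mp hs c hc
  simp only [pvDomChar, Bool.or_eq_true, Bool.and_eq_true, decide_eq_true_eq,
    beq_iff_eq] at this
  omega

theorem pv_hexlt (s t : String) (hs : pvDomStr s = true) (ht : pvDomStr t = true) :
    decide (pvLatin1Hex s < pvLatin1Hex t) = decide (s < t) := by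
  have hfs : s.toList.filter (fun c => c.toNat < 256) = s.toList :=
    List.filter_eq_self.mpr (by intro c hc; simpa using pv_dom_small s hs c hc)
  have hft : t.toList.filter (fun c => c.toNat < 256) = t.toList :=
    List.filter_eq_self.mpr (by intro c hc; simpa using pv_dom_small t ht c hc)
  apply decide_eq_decide.mpr
  rw [String.lt_iff_toList_lt, String.lt_iff_toList_lt]
  unfold pvLatin1Hex
  rw [String.toList_ofList, String.toList_ofList, hfs, hft]
  exact Iff.trans (List.lt_iff_lex_lt _ _)
    (Iff.trans (pv_flat_lt _ _ (pv_dom_small s hs) (pv_dom_small t ht))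
      (List.lt_iff_lex_lt _ _).symm)

theorem pv_slice_even (xs : List Int) : (PySem.List.slice? xs (some 0) none 2).getD []
    = (List.range ((xs.length + 1) / 2)).map (fun a => xs.getD (2*a) 0) := by
  unfold PySem.List.slice? PySem.List.sliceIndices
  norm_num
  have hcnt : (if 0 < xs.length then (((xs.length:Int) + 2 - 1) / 2).toNat else 0) = (xs.length + 1) / 2 := by
    split <;> omega
  rw [hcnt]
  have : ∀ x ∈ List.range ((xs.length + 1) / 2),
      xs[(2 * (x:Int)).toNat]? = some (xs[2*x]?.getD 0) := by
    intro x hx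
    simp only [List.mem_range] at hx
    have h2 : 2 * x < xs.length := by omega
    have ht : (2 * (x:Int)).toNat = 2 * x := by omega
    rw [ht, List.getElem?_eq_getElem h2]
    simp
  rw [List.filterMap_congr this]
  exact congrFun List.filterMap_eq_map _

theorem pv_slice_odd (xs : List Int) : (PySem.List.slice? xs (some 1) none 2).getD []
    = (List.range (xs.length / 2)).map (fun a => xs.getD (2*a+1) 0) := by
  unfold PySem.List.slice? PySem.List.sliceIndices
  norm_num
  have hcnt : (if 1 < xs.length then (((xs.length:Int) - min 1 (xs.length:Int) + 2 - 1) / 2).toNat else 0) = xs.length / 2 := by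
    rcases Nat.eq_zero_or_pos xs.length with h | h
    · simp [h]
    · have : min 1 ((xs.length:Int)) = 1 := by omega
      rw [this]; split <;> omega
  rw [hcnt]
  have : ∀ x ∈ List.range (xs.length / 2),
      xs[(min 1 (xs.length:Int) + 2 * (x:Int)).toNat]? = some (xs[2*x+1]?.getD 0) := by
    intro x hx
    simp only [List.mem_range] at hx
    have h2 : 2 * x + 1 < xs.length := by omega
    have hm : min 1 ((xs.length:Int)) = 1 := by omega
    have ht : (min 1 (xs.length:Int) + 2 * (x:Int)).toNat = 2 * x + 1 := by rw [hm]; omega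
    rw [ht, List.getElem?_eq_getElem h2]
    simp
  rw [List.filterMap_congr this]
  exact congrFun List.filterMap_eq_map _

theorem pv_zip_map_range {β γ : Type} (f : Nat → β) (g : Nat → γ) (p q : Nat) :
    ((List.range p).map f).zip ((List.range q).map g)
      = (List.range (min p q)).map (fun a => (f a, g a)) := by
  apply List.ext_getElem
  · simp
  · intro i h1 h2
    simp [List.getElem_zip]

theorem pv_zipdist (xs ys : List Int) :
    (List.range (min xs.length ys.length)).foldl
        (fun acc i => acc + |xs.getD i 0 - ys.getD i 0|) 0
      = ((xs.zip ys).map (fun p => |p.1 - p.2|)).sum := by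
  rw [PySem.List.foldl_add]
  rw [zero_add]
  congr 1
  apply List.ext_getElem
  · simp
  · intro i h1 h2
    simp only [List.getElem_map, List.getElem_range, List.getElem_zip]
    have hx : i < xs.length := by simp at h1; omega
    have hy : i < ys.length := by simp at h1; omega
    rw [List.getD_eq_getElem _ _ hx, List.getD_eq_getElem _ _ hy]

theorem pv_metrics_fold (g : Nat → Bool) (k : Nat) :
    (List.range k).foldl
        (fun (cm : Int × Int) idx =>
          if g idx = true then
            (if (idx : Int) = cm.1 then (cm.1 + 1, cm.2 + 1) else (cm.1, cm.2 + 1))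
          else cm) (0, 0)
      = (((((List.range k).map g).takeWhile id).length : Int),
         ((((List.range k).map g).count true) : Int)) := by
  induction k with
  | zero => simp
  | succ k ih =>
    rw [List.range_succ, List.foldl_append, ih, List.map_append, List.takeWhile_append]
    have hlen : (((List.range k).map g).takeWhile id).length ≤ k := by
      calc _ ≤ ((List.range k).map g).length := (List.takeWhile_prefix _).length_le
        _ = k := by simp
    simp only [List.foldl_cons, List.foldl_nil, List.map_cons, List.map_nil, List.count_append]
    by_cases hg : g k
    · simp only [hg, if_true, List.takeWhile_cons, id, List.takeWhile_nil, List.count_cons,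
        List.count_nil]
      have hcc : ((k:Int) = ((((List.range k).map g).takeWhile id).length : Int))
          ↔ ((((List.range k).map g).takeWhile id).length = ((List.range k).map g).length) := by
        simp only [List.length_map, List.length_range]; omega
      split_ifs with h1 h2 h2 <;> simp_all
    · simp only [hg, List.count_cons, List.takeWhile_cons, id]
      split_ifs with h1 <;> simp_all



-- B's zip-computed objective is A's _objective_tuple
theorem pv_objB_eq (p : String) (s m : Int) : pvObjB p s m = pvObjective p s m := by
  unfold pvObjB pvObjective pvWidePrefixMetrics pvPrefixDistance
  cases hfh : pvFromhex? p.toList with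
  | none => simp [pvTargetPrefix]
  | some raw =>
    simp only [Option.getD_some]
    have hbeq : ∀ x y : Int, (x == y) = decide (x = y) := by
      intro x y; by_cases h : x = y <;> simp [h]
    have hlen10 : pvTargetPrefix.length = 10 := rfl
    rw [pv_slice_even raw, pv_slice_odd raw, pv_slice_even pvTargetPrefix,
      pv_slice_odd pvTargetPrefix, pv_zip_map_range, pv_zip_map_range,
      List.map_map, List.map_map, pv_zip_map_range, List.map_map]
    have hmin1 : min ((raw.length+1)/2) (raw.length/2) = raw.length/2 := by omega
    rw [hmin1, hlen10]
    norm_num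
    have hfold := pv_metrics_fold (fun idx => decide
      (pvToLowerAscii (raw.getD (idx * 2) 0 + 256 * raw.getD (idx * 2 + 1) 0) =
       pvToLowerAscii (pvTargetPrefix.getD (idx * 2) 0 + 256 * pvTargetPrefix.getD (idx * 2 + 1) 0)))
      (min (raw.length / 2) 5)
    simp only [decide_eq_true_eq, List.getD_eq_getElem?_getD] at hfold
    rw [hfold]
    have hmapeq : (List.map
          ((fun p : Int × Int => pvToLowerAscii p.1 == pvToLowerAscii p.2) ∘ fun a =>
            (raw[2 * a]?.getD 0 + 256 * raw[2 * a + 1]?.getD 0,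
              pvTargetPrefix[2 * a]?.getD 0 + 256 * pvTargetPrefix[2 * a + 1]?.getD 0))
          (List.range (min (raw.length / 2) 5)))
        = (List.map
            (fun idx =>
              decide
                (pvToLowerAscii (raw[idx * 2]?.getD 0 + 256 * raw[idx * 2 + 1]?.getD 0) =
                  pvToLowerAscii (pvTargetPrefix[idx * 2]?.getD 0 + 256 * pvTargetPrefix[idx * 2 + 1]?.getD 0)))
            (List.range (min (raw.length / 2) 5))) := by
      apply List.map_congr_left
      intro a _
      simp [Function.comp, hbeq, Nat.mul_comm]
    rw [hmapeq]
    have hz := pv_zipdist raw pvTargetPrefix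
    simp only [hlen10, List.getD_eq_getElem?_getD] at hz
    refine ⟨rfl, rfl, ?_⟩
    rw [← hz]
    rcases lt_trichotomy raw.length 10 with h | h | h
    · simp [h]
    · simp only [h]
      norm_num
      have : List.drop 10 raw = [] := List.drop_eq_nil_of_le (by omega)
      simp [this]
    · rw [if_neg (by omega), if_neg (by omega), if_pos h, List.sum_eq_foldl]


-- ---- structural proofs: A's dict fold vs B's seen-set scan ----

-- A's replacement condition (definitionally the test inside pvStepA)
def pvACond (nxt cur : Int × Int × String × String) : Bool :=
  pvObjLt (pvObjective cur.2.2.2 cur.1 cur.2.1) (pvObjective nxt.2.2.2 nxt.1 nxt.2.1)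
    || (decide (pvObjective nxt.2.2.2 nxt.1 nxt.2.1 = pvObjective cur.2.2.2 cur.1 cur.2.1)
        && decide (pvLatin1Hex nxt.2.2.1 < pvLatin1Hex cur.2.2.1))

-- A's running best over one prefix group
def pvBestA? (l : List (Int × Int × String × String)) : Option (Int × Int × String × String) :=
  l.foldl (fun o nxt => match o with
    | none => some nxt
    | some cur => if pvACond nxt cur then some nxt else some cur) none

def pvDecF (it : Int × Int × String × String) :
    (List Int × String) × (Int × Int × String × String) :=
  (((pvObjList (pvObjB it.2.2.2 it.1 it.2.1)).map Neg.neg, it.2.2.1), it)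

theorem pv_decor_eq_map (items : List (Int × Int × String × String)) :
    pvDecor items = items.map pvDecF := rfl

theorem pv_bestA?_append (l : List (Int × Int × String × String)) (x : Int × Int × String × String) :
    pvBestA? (l ++ [x]) = some (match pvBestA? l with
      | none => x
      | some cur => if pvACond x cur then x else cur) := by
  unfold pvBestA?
  rw [List.foldl_append]
  cases (List.foldl (fun o nxt => match o with
    | none => some nxt
    | some cur => if pvACond nxt cur then some nxt else some cur) none l) with
  | none => rfl
  | some cur => simp only [List.foldl_cons, List.foldl_nil]; split <;> rfl

-- A's dict lookup after the fold is the running best of the prefix's group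
theorem pv_getA (l : List (Int × Int × String × String)) (p : String) :
    (l.foldl pvStepA PySem.Dict.empty).get? p
      = pvBestA? (l.filter (fun it => it.2.2.2 == p)) := by
  induction l using List.reverseRecOn with
  | nil => rfl
  | append_singleton l x ih =>
    rw [List.foldl_append, List.filter_append, List.foldl_cons, List.foldl_nil]
    by_cases hx : x.2.2.2 = p
    · subst hx
      simp only [List.filter_cons, beq_self_eq_true, if_true, List.filter_nil]
      rw [pv_bestA?_append]
      cases hg : (l.foldl pvStepA PySem.Dict.empty).get? x.2.2.2 with
      | none =>
        have hb : pvBestA? (List.filter (fun it => it.2.2.2 == x.2.2.2) l) = none := by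
          rw [← ih, hg]
        simp only [pvStepA, hg, hb, PySem.Dict.get?_insert_self]
      | some cur =>
        have hb : pvBestA? (List.filter (fun it => it.2.2.2 == x.2.2.2) l) = some cur := by
          rw [← ih, hg]
        simp only [pvStepA, hg, hb]
        by_cases hcond : pvACond x cur
        · rw [if_pos (by simpa [pvACond] using hcond), if_pos hcond,
            PySem.Dict.get?_insert_self]
        · rw [if_neg (by simpa [pvACond] using hcond), if_neg hcond, ih, hb]
    · have hbq : (x.2.2.2 == p) = false := by simp [hx]
      simp only [List.filter_cons, hbq, if_false, Bool.false_eq_true, List.filter_nil,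
        List.append_nil]
      cases hg : (l.foldl pvStepA PySem.Dict.empty).get? x.2.2.2 with
      | none =>
        simp only [pvStepA, hg]
        rw [PySem.Dict.get?_insert_of_ne _ _ (fun h => hx h.symm), ih]
      | some cur =>
        simp only [pvStepA, hg]
        split
        · rw [PySem.Dict.get?_insert_of_ne _ _ (fun h => hx h.symm), ih]
        · exact ih

-- A's key list after the fold: the prefixes in first-occurrence order
theorem pv_keysA (l : List (Int × Int × String × String)) :
    (l.foldl pvStepA PySem.Dict.empty).keys
      = PySem.List.dedup (l.map (fun it => it.2.2.2)) := by
  induction l using List.reverseRecOn with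
  | nil => rfl
  | append_singleton l x ih =>
    rw [List.foldl_append, List.foldl_cons, List.foldl_nil, List.map_append]
    simp only [List.map_cons, List.map_nil]
    rw [PySem.List.dedup_eq_ofList, PySem.Set.ofList_append_singleton,
      ← PySem.List.dedup_eq_ofList]
    cases hg : (l.foldl pvStepA PySem.Dict.empty).get? x.2.2.2 with
    | none =>
      have hc : (l.foldl pvStepA PySem.Dict.empty).contains x.2.2.2 = false := by
        rw [PySem.Dict.contains_eq_isSome_get?, hg]; rfl
      have hnmem : x.2.2.2 ∉ PySem.List.dedup (List.map (fun it => it.2.2.2) l) := by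
        rw [← ih]
        intro hmem
        rw [(PySem.Dict.contains_iff_mem_keys _ _).mpr hmem] at hc
        simp at hc
      have hadd : PySem.Set.add (PySem.List.dedup (List.map (fun it => it.2.2.2) l)) x.2.2.2
          = PySem.List.dedup (List.map (fun it => it.2.2.2) l) ++ [x.2.2.2] := by
        unfold PySem.Set.add
        rw [if_neg (by simpa using hnmem)]
      rw [hadd, ← ih]
      simp only [pvStepA, hg]
      exact PySem.Dict.keys_insert_of_not_contains _ _ hc
    | some cur =>
      have hc : (l.foldl pvStepA PySem.Dict.empty).contains x.2.2.2 = true := by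
        rw [PySem.Dict.contains_eq_isSome_get?, hg]; rfl
      have hmem : x.2.2.2 ∈ PySem.List.dedup (List.map (fun it => it.2.2.2) l) := by
        rw [← ih]
        exact (PySem.Dict.contains_iff_mem_keys _ _).mp hc
      have hadd : PySem.Set.add (PySem.List.dedup (List.map (fun it => it.2.2.2) l)) x.2.2.2
          = PySem.List.dedup (List.map (fun it => it.2.2.2) l) := by
        unfold PySem.Set.add
        rw [if_pos (by simpa using hmem)]
      rw [hadd, ← ih]
      simp only [pvStepA, hg]
      split
      · exact PySem.Dict.keys_insert_of_contains _ _ hc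
      · rfl

-- B's fold state: seen set and one representative per first-occurring prefix
theorem pv_stateB (dec u : List ((List Int × String) × (Int × Int × String × String))) :
    u.foldl (pvStepOuter dec) (PySem.Set.empty, [])
      = (PySem.Set.ofList (u.map (fun e => e.2.2.2.2)),
         (PySem.List.dedup (u.map (fun e => e.2.2.2.2))).map
           (fun p => (pvMinSel (dec.filter (fun d => d.2.2.2.2 == p))).2)) := by
  induction u using List.reverseRecOn with
  | nil => rfl
  | append_singleton u e ih =>
    rw [List.foldl_append, List.foldl_cons, List.foldl_nil, ih]
    have hof : PySem.Set.ofList ((u ++ [e]).map (fun e => e.2.2.2.2))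
        = PySem.Set.add (PySem.Set.ofList (u.map (fun e => e.2.2.2.2))) e.2.2.2.2 := by
      rw [List.map_append]
      simp only [List.map_cons, List.map_nil]
      exact PySem.Set.ofList_append_singleton _ _
    have hdd : PySem.List.dedup ((u ++ [e]).map (fun e => e.2.2.2.2))
        = PySem.Set.add (PySem.List.dedup (u.map (fun e => e.2.2.2.2))) e.2.2.2.2 := by
      rw [List.map_append]
      simp only [List.map_cons, List.map_nil]
      rw [PySem.List.dedup_eq_ofList, PySem.Set.ofList_append_singleton,
        ← PySem.List.dedup_eq_ofList]
    rw [hof, hdd]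
    unfold pvStepOuter
    by_cases hmem : e.2.2.2.2 ∈ PySem.Set.ofList (u.map (fun e => e.2.2.2.2))
    · rw [if_pos (by rw [PySem.Set.contains_iff]; exact hmem)]
      have h1 : PySem.Set.add (PySem.Set.ofList (u.map (fun e => e.2.2.2.2))) e.2.2.2.2
          = PySem.Set.ofList (u.map (fun e => e.2.2.2.2)) := by
        unfold PySem.Set.add
        rw [if_pos (by simpa using hmem)]
      have h2 : PySem.Set.add (PySem.List.dedup (u.map (fun e => e.2.2.2.2))) e.2.2.2.2
          = PySem.List.dedup (u.map (fun e => e.2.2.2.2)) := by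
        unfold PySem.Set.add
        rw [if_pos (by simpa [PySem.List.dedup_eq_ofList] using hmem)]
      rw [h1, h2]
    · rw [if_neg (show ¬ (PySem.Set.contains (PySem.Set.ofList (u.map (fun e => e.2.2.2.2))) e.2.2.2.2 = true) by
        rw [PySem.Set.contains_iff]; exact hmem)]
      have h1 : PySem.Set.add (PySem.Set.ofList (u.map (fun e => e.2.2.2.2))) e.2.2.2.2
          = PySem.Set.ofList (u.map (fun e => e.2.2.2.2)) ++ [e.2.2.2.2] := by
        unfold PySem.Set.add
        rw [if_neg (by simpa using hmem)]
      have h2 : PySem.Set.add (PySem.List.dedup (u.map (fun e => e.2.2.2.2))) e.2.2.2.2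
          = PySem.List.dedup (u.map (fun e => e.2.2.2.2)) ++ [e.2.2.2.2] := by
        unfold PySem.Set.add
        rw [if_neg (by simpa [PySem.List.dedup_eq_ofList] using hmem)]
      rw [h1, h2, List.map_append]
      rfl

theorem pv_int_beq (x y : Int) : (x == y) = decide (x = y) := by
  by_cases h : x = y <;> simp [h]

theorem pvListLt_cons (a b : Int) (as bs : List Int) :
    pvListLt (a :: as) (b :: bs) = (decide (a < b) || (a == b && pvListLt as bs)) := rfl

-- negated 5-tuple-as-list comparison flips A's tuple comparison
theorem pv_listlt_neg (o1 o2 : Int × Int × Int × Int × Int) :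
    pvListLt ((pvObjList o1).map Neg.neg) ((pvObjList o2).map Neg.neg) = pvObjLt o2 o1 := by
  obtain ⟨a1, a2, a3, a4, a5⟩ := o1
  obtain ⟨b1, b2, b3, b4, b5⟩ := o2
  simp only [pvObjList, pvObjLt, List.map_cons, List.map_nil, pvListLt_cons, pv_int_beq,
    neg_lt_neg_iff, neg_inj]
  show _ = _
  simp only [show ∀ bs : List Int, pvListLt [] bs = match bs with | [] => false | _ :: _ => true from fun bs => by cases bs <;> rfl]
  by_cases h1 : b1 < a1 <;> by_cases h2 : a1 = b1 <;>
    by_cases h3 : b2 < a2 <;> by_cases h4 : a2 = b2 <;>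
    by_cases h5 : b3 < a3 <;> by_cases h6 : a3 = b3 <;>
    by_cases h7 : b4 < a4 <;> by_cases h8 : a4 = b4 <;>
    simp [h1, h2, h3, h4, h5, h6, h7, h8, eq_comm]

theorem pv_listeq_neg (o1 o2 : Int × Int × Int × Int × Int) :
    (((pvObjList o1).map Neg.neg) == ((pvObjList o2).map Neg.neg)) = decide (o1 = o2) := by
  obtain ⟨a1, a2, a3, a4, a5⟩ := o1
  obtain ⟨b1, b2, b3, b4, b5⟩ := o2
  by_cases h : (a1, a2, a3, a4, a5) = ((b1, b2, b3, b4, b5) : Int × Int × Int × Int × Int)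
  · simp_all [pvObjList]
  · simp only [h, decide_false]
    rw [beq_eq_false_iff_ne]
    simp only [pvObjList, List.map_cons, List.map_nil, ne_eq, List.cons.injEq, neg_inj]
    intro hcon
    exact h (by simp_all)

-- B's selection-key comparison is A's replacement condition (on Dom candidates)
theorem pv_cond_eq (n c : Int × Int × String × String)
    (hn : pvDomStr n.2.2.1 = true) (hc : pvDomStr c.2.2.1 = true) :
    pvSelLt (pvDecF n).1 (pvDecF c).1 = pvACond n c := by
  unfold pvSelLt pvDecF pvACond
  simp only
  rw [pv_objB_eq, pv_objB_eq, pv_listlt_neg, pv_listeq_neg, ← pv_hexlt _ _ hn hc]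

theorem pv_bestA?_cons (h : Int × Int × String × String) (t : List (Int × Int × String × String)) :
    pvBestA? (h :: t) = some (t.foldl (fun cur nxt => if pvACond nxt cur then nxt else cur) h) := by
  unfold pvBestA?
  rw [List.foldl_cons]
  induction t generalizing h with
  | nil => rfl
  | cons x t' ih =>
    rw [List.foldl_cons, List.foldl_cons]
    simp only
    split <;> exact ih _

-- lockstep: B's decorated min scan computes A's running best
theorem pv_lock (t : List (Int × Int × String × String)) (h : Int × Int × String × String)
    (hdom : ∀ x ∈ h :: t, pvDomStr x.2.2.1 = true) :
    (t.map pvDecF).foldl (fun best e => if pvSelLt e.1 best.1 then e else best) (pvDecF h)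
      = pvDecF (t.foldl (fun cur nxt => if pvACond nxt cur then nxt else cur) h) := by
  induction t generalizing h with
  | nil => rfl
  | cons x t' ih =>
    rw [List.map_cons, List.foldl_cons, List.foldl_cons]
    rw [pv_cond_eq x h (hdom x (List.mem_cons_of_mem _ List.mem_cons_self))
      (hdom h List.mem_cons_self)]
    by_cases hcond : pvACond x h
    · rw [if_pos hcond, if_pos hcond]
      exact ih x (fun y hy => hdom y (by
        rcases List.mem_cons.mp hy with rfl | hy'
        · exact List.mem_cons_of_mem _ List.mem_cons_self
        · exact List.mem_cons_of_mem _ (List.mem_cons_of_mem _ hy')))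
    · rw [if_neg hcond, if_neg hcond]
      exact ih h (fun y hy => hdom y (by
        rcases List.mem_cons.mp hy with rfl | hy'
        · exact List.mem_cons_self
        · exact List.mem_cons_of_mem _ (List.mem_cons_of_mem _ hy')))

-- the group representative: A's running best is B's min over the decorated group
theorem pv_minsel_group (g : List (Int × Int × String × String)) (hg : g ≠ [])
    (hdom : ∀ x ∈ g, pvDomStr x.2.2.1 = true) :
    pvBestA? g = some ((pvMinSel (g.map pvDecF)).2) := by
  cases g with
  | nil => exact absurd rfl hg
  | cons h t =>
    rw [pv_bestA?_cons, List.map_cons]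
    show _ = some ((List.foldl (fun best e => if pvSelLt e.1 best.1 then e else best) (pvDecF h) (t.map pvDecF)).2)
    rw [pv_lock t h hdom]
    rfl

theorem pv_filter_dec (items : List (Int × Int × String × String)) (p : String) :
    (pvDecor items).filter (fun d => d.2.2.2.2 == p)
      = (items.filter (fun it => it.2.2.2 == p)).map pvDecF := by
  rw [pv_decor_eq_map, List.filter_map]
  rfl

theorem pvListLt_nil : pvListLt [] [] = false := rfl

theorem pv_list_beq (xs ys : List Int) : (xs == ys) = decide (xs = ys) := by
  by_cases h : xs = ys <;> simp [h]

-- B's flattened (objective ++ [-len], candidate) comparison is A's tuple comparison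
theorem pv_listlt_app (o1 o2 : Int × Int × Int × Int × Int) (i1 i2 : Int) :
    pvListLt (pvObjList o1 ++ [i1]) (pvObjList o2 ++ [i2])
      = (pvObjLt o1 o2 || (decide (o1 = o2) && decide (i1 < i2))) := by
  obtain ⟨a1, a2, a3, a4, a5⟩ := o1
  obtain ⟨b1, b2, b3, b4, b5⟩ := o2
  simp only [pvObjList, pvObjLt, List.cons_append, List.nil_append, pvListLt_cons,
    pvListLt_nil, pv_int_beq, Prod.mk.injEq]
  by_cases h1 : a1 < b1 <;> by_cases h2 : a1 = b1 <;>
    by_cases h3 : a2 < b2 <;> by_cases h4 : a2 = b2 <;>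
    by_cases h5 : a3 < b3 <;> by_cases h6 : a3 = b3 <;>
    by_cases h7 : a4 < b4 <;> by_cases h8 : a4 = b4 <;>
    by_cases h9 : a5 < b5 <;> by_cases h10 : a5 = b5 <;>
    simp [h1, h2, h3, h4, h5, h6, h7, h8, h9, h10]

theorem pv_listeq_app (o1 o2 : Int × Int × Int × Int × Int) (i1 i2 : Int) :
    ((pvObjList o1 ++ [i1]) == (pvObjList o2 ++ [i2]))
      = (decide (o1 = o2) && decide (i1 = i2)) := by
  obtain ⟨a1, a2, a3, a4, a5⟩ := o1
  obtain ⟨b1, b2, b3, b4, b5⟩ := o2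
  rw [pv_list_beq]
  simp only [pvObjList, List.cons_append, List.nil_append, List.cons.injEq, Prod.mk.injEq]
  by_cases h : (a1, a2, a3, a4, a5) = ((b1, b2, b3, b4, b5) : Int × Int × Int × Int × Int) <;>
    by_cases hi : i1 = i2 <;> simp_all

-- the final sort keys compare identically in both ports
theorem pv_keylt_eq (x y : Int × Int × String × String) :
    pvKeyLtA (pvSortKey x) (pvSortKey y) = pvSelLt (pvKeyB x) (pvKeyB y) := by
  unfold pvKeyLtA pvSortKey pvSelLt pvKeyB
  simp only
  rw [pv_objB_eq, pv_objB_eq, pv_listlt_app, pv_listeq_app]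
  cases hx : pvObjLt (pvObjective x.2.2.2 x.1 x.2.1) (pvObjective y.2.2.2 y.1 y.2.1) <;>
    by_cases he : pvObjective x.2.2.2 x.1 x.2.1 = pvObjective y.2.2.2 y.1 y.2.1 <;>
    by_cases hl : -(PySem.Str.len x.2.2.1) < -(PySem.Str.len y.2.2.1) <;>
    by_cases hq : -(PySem.Str.len x.2.2.1) = -(PySem.Str.len y.2.2.1) <;>
    simp [he]

theorem pv_dom_items (items : List (Int × Int × String × String)) (limit : Int)
    (hd : Dom_dedupe_top_scored_by_prefix_py items limit) :
    ∀ it ∈ items, pvDomStr it.2.2.1 = true := by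
  unfold Dom_dedupe_top_scored_by_prefix_py at hd
  simp only [Bool.and_eq_true, List.all_eq_true] at hd
  intro it hit
  exact (hd.1 it hit).2.2.1

-- A's deduped values list is exactly B's representative list
theorem pv_values_eq (items : List (Int × Int × String × String))
    (hdom : ∀ it ∈ items, pvDomStr it.2.2.1 = true) :
    (items.foldl pvStepA PySem.Dict.empty).values
      = ((pvDecor items).foldl (pvStepOuter (pvDecor items)) (PySem.Set.empty, [])).2 := by
  rw [pv_stateB]
  have hnd : (items.foldl pvStepA PySem.Dict.empty).keys.Nodup := by
    rw [pv_keysA]; exact PySem.List.nodup_dedup _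
  rw [PySem.Dict.values_eq_map_keys _ hnd (0, 0, "", ""), pv_keysA]
  have hmap : (pvDecor items).map (fun e => e.2.2.2.2) = items.map (fun it => it.2.2.2) := by
    rw [pv_decor_eq_map, List.map_map]; rfl
  rw [hmap]
  apply List.map_congr_left
  intro p hp
  have hpmem : p ∈ items.map (fun it => it.2.2.2) := (PySem.List.mem_dedup _ _).mp hp
  obtain ⟨it0, hit0, hpe⟩ := List.mem_map.mp hpmem
  have hne : items.filter (fun it => it.2.2.2 == p) ≠ [] := by
    intro hnil
    have hin : it0 ∈ items.filter (fun it => it.2.2.2 == p) :=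
      List.mem_filter.mpr ⟨hit0, by simp [hpe]⟩
    rw [hnil] at hin
    cases hin
  rw [PySem.Dict.getD_eq_get?_getD, pv_getA,
    pv_minsel_group _ hne (fun x hx => hdom x (List.mem_filter.mp hx).1), pv_filter_dec]
  rfl


-- ===== VERDICT (by name: the statement is the Claim_ definition above) =====
theorem dedupe_top_scored_by_prefix_py_spec : Claim_equal_dedupe_top_scored_by_prefix_py := by
  intro items limit hdomfull _hpre
  unfold Spec_dedupe_top_scored_by_prefix_py
  show PySem.List.slice (pvSortDesc (fun a b => pvKeyLtA (pvSortKey a) (pvSortKey b))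
      ((items.foldl pvStepA PySem.Dict.empty).values)) none (some limit)
    = PySem.List.slice (pvSortDesc (fun a b => pvSelLt (pvKeyB a) (pvKeyB b))
      (((pvDecor items).foldl (pvStepOuter (pvDecor items)) (PySem.Set.empty, [])).2)) none (some limit)
  rw [← pv_values_eq items (pv_dom_items items limit hdomfull)]
  have hfun : (fun a b => pvKeyLtA (pvSortKey a) (pvSortKey b))
      = (fun a b => pvSelLt (pvKeyB a) (pvKeyB b)) :=
    funext fun a => funext fun b => pv_keylt_eq a b
  rw [hfun]
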